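-- pv_equiv track=rewrite | github.com/maxmakovskiy/magicode | 2025/day9.py | is_enclosed
-- ===== SOURCE A (Python) =====
-- from itertools import combinations, pairwise, repeat
--
-- Point = tuple[int, int]
--
-- def is_enclosed(corners: tuple[Point, Point], polygon: list[Point]) -> bool:
--     x1, x2 = min(corners[0][0], corners[1][0]), max(corners[0][0], corners[1][0])
--     y1, y2 = min(corners[0][1], corners[1][1]), max(corners[0][1], corners[1][1])
--
--     xs = list(range(x1, x2 + 1))
--     ys = list(range(y1, y2 + 1))
--
--     borders = [
--         list(zip(xs, repeat(y2))),
--         list(zip(xs, repeat(y1))),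
--         list(zip(repeat(x1), ys)),
--         list(zip(repeat(x2), ys))
--     ]
--
--     for b in borders:
--         for p in b:
--             if p not in polygon:
--                 return False
--
--     return True
-- ===== SOURCE B (Python) =====
-- def is_enclosed(corners, polygon):
--     (ax, ay), (bx, by) = corners
--     x1, x2 = (ax, bx) if ax <= bx else (bx, ax)
--     y1, y2 = (ay, by) if ay <= by else (by, ay)
--     # number of DISTINCT points on the rectangle border
--     if x1 == x2 and y1 == y2:
--         n = 1
--     elif x1 == x2:
--         n = y2 - y1 + 1
--     elif y1 == y2:
--         n = x2 - x1 + 1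
--     else:
--         n = 2 * (x2 - x1) + 2 * (y2 - y1)
--     matched = set()
--     for (px, py) in polygon:
--         if x1 <= px <= x2 and y1 <= py <= y2 and (px == x1 or px == x2 or py == y1 or py == y2):
--             matched.add((px, py))
--     return len(matched) == n
-- ===== Notes on version B (the rewrite author's own statement) =====
-- stated objective: faster
-- what changed: Instead of generating every rectangle-border grid point and probing it against the polygon list, B computes the count of distinct border points in closed form and makes one pass over the polygon collecting border points into a set, returning whether the set reaches that count.
import Mathlib
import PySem

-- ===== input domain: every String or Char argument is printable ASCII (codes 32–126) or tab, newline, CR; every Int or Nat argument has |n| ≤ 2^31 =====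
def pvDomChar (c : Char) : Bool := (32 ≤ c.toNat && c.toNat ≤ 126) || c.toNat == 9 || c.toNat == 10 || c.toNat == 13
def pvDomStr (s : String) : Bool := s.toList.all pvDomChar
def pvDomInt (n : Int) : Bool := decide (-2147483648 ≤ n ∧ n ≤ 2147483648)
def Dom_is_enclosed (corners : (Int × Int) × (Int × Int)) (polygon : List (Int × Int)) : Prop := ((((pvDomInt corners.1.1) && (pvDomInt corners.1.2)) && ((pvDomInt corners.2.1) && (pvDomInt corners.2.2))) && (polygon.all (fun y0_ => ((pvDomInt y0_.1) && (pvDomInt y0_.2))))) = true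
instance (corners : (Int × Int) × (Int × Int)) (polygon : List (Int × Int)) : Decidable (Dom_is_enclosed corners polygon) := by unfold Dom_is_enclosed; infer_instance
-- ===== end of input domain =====

-- B replaces A's "generate every border grid point and probe the polygon list" by one pass over
-- the polygon collecting border points into a set, compared against a closed-form count of the
-- distinct border points (objective: faster when the rectangle is large).

-- ===== PORT A =====
-- inner 'for p in b: if p not in polygon: return False'
def pvCheckBorder (polygon : List (Int × Int)) : List (Int × Int) → Bool
  | [] => true
  | p :: rest => if p ∈ polygon then pvCheckBorder polygon rest else false

-- outer 'for b in borders: … return True'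
def pvCheckBorders (polygon : List (Int × Int)) : List (List (Int × Int)) → Bool
  | [] => true
  | b :: rest => if pvCheckBorder polygon b then pvCheckBorders polygon rest else false

def is_enclosed (corners : (Int × Int) × (Int × Int)) (polygon : List (Int × Int)) : Bool :=
  let x1 := min corners.1.1 corners.2.1
  let x2 := max corners.1.1 corners.2.1
  let y1 := min corners.1.2 corners.2.2
  let y2 := max corners.1.2 corners.2.2
  let xs := PySem.List.pyRange x1 (x2 + 1) 1
  let ys := PySem.List.pyRange y1 (y2 + 1) 1
  let borders := [xs.map (fun x => (x, y2)), xs.map (fun x => (x, y1)),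
                  ys.map (fun y => (x1, y)), ys.map (fun y => (x2, y))]
  pvCheckBorders polygon borders

-- ===== PORT B =====
def is_enclosed_alt (corners : (Int × Int) × (Int × Int)) (polygon : List (Int × Int)) : Bool :=
  let x1 := if corners.1.1 ≤ corners.2.1 then corners.1.1 else corners.2.1
  let x2 := if corners.1.1 ≤ corners.2.1 then corners.2.1 else corners.1.1
  let y1 := if corners.1.2 ≤ corners.2.2 then corners.1.2 else corners.2.2
  let y2 := if corners.1.2 ≤ corners.2.2 then corners.2.2 else corners.1.2
  let n : Int :=
    if x1 = x2 ∧ y1 = y2 then 1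
    else if x1 = x2 then y2 - y1 + 1
    else if y1 = y2 then x2 - x1 + 1
    else 2 * (x2 - x1) + 2 * (y2 - y1)
  let matched : PySem.Set (Int × Int) :=
    polygon.foldl (fun s p =>
      if x1 ≤ p.1 ∧ p.1 ≤ x2 ∧ y1 ≤ p.2 ∧ p.2 ≤ y2 ∧
          (p.1 = x1 ∨ p.1 = x2 ∨ p.2 = y1 ∨ p.2 = y2)
      then PySem.Set.add s p else s) PySem.Set.empty
  PySem.Set.len matched == n

-- ===== PRECONDITION & SPEC =====
def Spec_is_enclosed (corners : (Int × Int) × (Int × Int)) (polygon : List (Int × Int)) (out : Bool) : Prop := out = is_enclosed_alt corners polygon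
instance (corners : (Int × Int) × (Int × Int)) (polygon : List (Int × Int)) (out : Bool) : Decidable (Spec_is_enclosed corners polygon out) := by unfold Spec_is_enclosed; infer_instance

-- ===== CLAIM (what is proved, stated in full; the proofs are below) =====
def Claim_equal_is_enclosed : Prop := ∀ (corners : (Int × Int) × (Int × Int)) (polygon : List (Int × Int)), Dom_is_enclosed corners polygon → Spec_is_enclosed corners polygon (is_enclosed corners polygon)

-- ===== LEMMAS AND PROOFS =====

-- "p lies on the border of the rectangle [x1,x2] × [y1,y2]"
def pvOnB (x1 x2 y1 y2 : Int) (p : Int × Int) : Prop :=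
  x1 ≤ p.1 ∧ p.1 ≤ x2 ∧ y1 ≤ p.2 ∧ p.2 ≤ y2 ∧
    (p.1 = x1 ∨ p.1 = x2 ∨ p.2 = y1 ∨ p.2 = y2)

-- the distinct border points, as an explicit duplicate-free list
def pvE (x1 x2 y1 y2 : Int) : List (Int × Int) :=
  if x1 = x2 ∧ y1 = y2 then [(x1, y1)]
  else if x1 = x2 then (PySem.List.pyRange y1 (y2 + 1) 1).map (fun y => (x1, y))
  else if y1 = y2 then (PySem.List.pyRange x1 (x2 + 1) 1).map (fun x => (x, y1))
  else (PySem.List.pyRange x1 (x2 + 1) 1).map (fun x => (x, y1))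
    ++ (PySem.List.pyRange x1 (x2 + 1) 1).map (fun x => (x, y2))
    ++ (PySem.List.pyRange (y1 + 1) y2 1).map (fun y => (x1, y))
    ++ (PySem.List.pyRange (y1 + 1) y2 1).map (fun y => (x2, y))

lemma pvCheckBorder_iff (polygon : List (Int × Int)) (l : List (Int × Int)) :
    pvCheckBorder polygon l = true ↔ ∀ p ∈ l, p ∈ polygon := by
  induction l with
  | nil => simp [pvCheckBorder]
  | cons p rest ih =>
    by_cases h : p ∈ polygon <;> simp [pvCheckBorder, h, ih]

lemma pvCheckBorders_iff (polygon : List (Int × Int)) (bs : List (List (Int × Int))) :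
    pvCheckBorders polygon bs = true ↔ ∀ b ∈ bs, pvCheckBorder polygon b = true := by
  induction bs with
  | nil => simp [pvCheckBorders]
  | cons b rest ih =>
    simp only [pvCheckBorders, List.mem_cons]
    by_cases h : pvCheckBorder polygon b = true
    · simp [h, ih]
    · simp only [h, Bool.false_eq_true, if_false]
      constructor
      · intro hf; cases hf
      · intro hall; exact absurd (hall b (Or.inl rfl)) h

lemma pvMemH (a b y u v : Int) :
    (u, v) ∈ (PySem.List.pyRange a b 1).map (fun x => (x, y)) ↔ a ≤ u ∧ u < b ∧ v = y := by
  simp only [List.mem_map, PySem.List.mem_pyRange_one, Prod.mk.injEq]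
  constructor
  · rintro ⟨x, hx, rfl, rfl⟩; omega
  · rintro ⟨h1, h2, rfl⟩; exact ⟨u, by omega, rfl, rfl⟩

lemma pvMemV (x a b u v : Int) :
    (u, v) ∈ (PySem.List.pyRange a b 1).map (fun y => (x, y)) ↔ u = x ∧ a ≤ v ∧ v < b := by
  simp only [List.mem_map, PySem.List.mem_pyRange_one, Prod.mk.injEq]
  constructor
  · rintro ⟨y, hy, rfl, rfl⟩; omega
  · rintro ⟨rfl, h1, h2⟩; exact ⟨v, by omega, rfl, rfl⟩

lemma pvMem_borders (x1 x2 y1 y2 : Int) (hx : x1 ≤ x2) (hy : y1 ≤ y2) (p : Int × Int) :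
    (p ∈ (PySem.List.pyRange x1 (x2 + 1) 1).map (fun x => (x, y2)) ∨
     p ∈ (PySem.List.pyRange x1 (x2 + 1) 1).map (fun x => (x, y1)) ∨
     p ∈ (PySem.List.pyRange y1 (y2 + 1) 1).map (fun y => (x1, y)) ∨
     p ∈ (PySem.List.pyRange y1 (y2 + 1) 1).map (fun y => (x2, y))) ↔
    pvOnB x1 x2 y1 y2 p := by
  obtain ⟨u, v⟩ := p
  simp only [pvOnB, pvMemH, pvMemV]
  omega

lemma pvMem_E (x1 x2 y1 y2 : Int) (hx : x1 ≤ x2) (hy : y1 ≤ y2) (p : Int × Int) :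
    p ∈ pvE x1 x2 y1 y2 ↔ pvOnB x1 x2 y1 y2 p := by
  obtain ⟨u, v⟩ := p
  unfold pvE pvOnB
  split_ifs with h1 h2 h3 <;>
    simp only [List.mem_singleton, List.mem_append, pvMemH, pvMemV, Prod.mk.injEq] <;>
    omega

lemma pvNodup_E (x1 x2 y1 y2 : Int) : (pvE x1 x2 y1 y2).Nodup := by
  have hinj1 : ∀ y : Int, Function.Injective (fun x : Int => (x, y)) := by
    intro y a b h; simpa using h
  have hinj2 : ∀ x : Int, Function.Injective (fun y : Int => (x, y)) := by
    intro x a b h; simpa using h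
  unfold pvE
  split_ifs with h1 h2 h3
  · simp
  · exact (PySem.List.nodup_pyRange_one _ _).map (hinj2 x1)
  · exact (PySem.List.nodup_pyRange_one _ _).map (hinj1 y1)
  · refine List.Nodup.append (List.Nodup.append (List.Nodup.append ?_ ?_ ?_) ?_ ?_) ?_ ?_
    · exact (PySem.List.nodup_pyRange_one _ _).map (hinj1 y1)
    · exact (PySem.List.nodup_pyRange_one _ _).map (hinj1 y2)
    · intro p hp hq
      obtain ⟨u, v⟩ := p
      simp only [pvMemH] at hp hq
      omega
    · exact (PySem.List.nodup_pyRange_one _ _).map (hinj2 x1)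
    · intro p hp hq
      obtain ⟨u, v⟩ := p
      simp only [List.mem_append, pvMemH, pvMemV] at hp hq
      omega
    · exact (PySem.List.nodup_pyRange_one _ _).map (hinj2 x2)
    · intro p hp hq
      obtain ⟨u, v⟩ := p
      simp only [List.mem_append, pvMemH, pvMemV] at hp hq
      omega

lemma pvLen_E (x1 x2 y1 y2 : Int) (hx : x1 ≤ x2) (hy : y1 ≤ y2) :
    ((pvE x1 x2 y1 y2).length : Int) =
      if x1 = x2 ∧ y1 = y2 then 1
      else if x1 = x2 then y2 - y1 + 1
      else if y1 = y2 then x2 - x1 + 1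
      else 2 * (x2 - x1) + 2 * (y2 - y1) := by
  unfold pvE
  split_ifs with h1 h2 h3 <;>
    simp only [List.length_singleton, List.length_append, List.length_map,
      PySem.List.length_pyRange_one] <;> push_cast <;> omega

lemma pvMatched_mem (x1 x2 y1 y2 : Int) (polygon : List (Int × Int)) (s : PySem.Set (Int × Int))
    (hs : List.Nodup s) :
    List.Nodup (polygon.foldl (fun s p =>
        if x1 ≤ p.1 ∧ p.1 ≤ x2 ∧ y1 ≤ p.2 ∧ p.2 ≤ y2 ∧
            (p.1 = x1 ∨ p.1 = x2 ∨ p.2 = y1 ∨ p.2 = y2)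
        then PySem.Set.add s p else s) s) ∧
    ∀ q, (q ∈ polygon.foldl (fun s p =>
        if x1 ≤ p.1 ∧ p.1 ≤ x2 ∧ y1 ≤ p.2 ∧ p.2 ≤ y2 ∧
            (p.1 = x1 ∨ p.1 = x2 ∨ p.2 = y1 ∨ p.2 = y2)
        then PySem.Set.add s p else s) s ↔
      q ∈ s ∨ (q ∈ polygon ∧ pvOnB x1 x2 y1 y2 q)) := by
  induction polygon generalizing s with
  | nil => exact ⟨hs, fun q => by simp⟩
  | cons p rest ih =>
    simp only [List.foldl_cons]
    by_cases hc : x1 ≤ p.1 ∧ p.1 ≤ x2 ∧ y1 ≤ p.2 ∧ p.2 ≤ y2 ∧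
        (p.1 = x1 ∨ p.1 = x2 ∨ p.2 = y1 ∨ p.2 = y2)
    · rw [if_pos hc]
      obtain ⟨hn, hm⟩ := ih (PySem.Set.add s p) (PySem.Set.nodup_add s p hs)
      refine ⟨hn, fun q => ?_⟩
      rw [hm q, PySem.Set.mem_add]
      constructor
      · rintro ((hq | rfl) | ⟨hq, hb⟩)
        · exact Or.inl hq
        · exact Or.inr ⟨by simp, hc⟩
        · exact Or.inr ⟨by simp [hq], hb⟩
      · rintro (hq | ⟨hq, hb⟩)
        · exact Or.inl (Or.inl hq)
        · rcases List.mem_cons.mp hq with rfl | hq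
          · exact Or.inl (Or.inr rfl)
          · exact Or.inr ⟨hq, hb⟩
    · rw [if_neg hc]
      obtain ⟨hn, hm⟩ := ih s hs
      refine ⟨hn, fun q => ?_⟩
      rw [hm q]
      constructor
      · rintro (hq | ⟨hq, hb⟩)
        · exact Or.inl hq
        · exact Or.inr ⟨by simp [hq], hb⟩
      · rintro (hq | ⟨hq, hb⟩)
        · exact Or.inl hq
        · rcases List.mem_cons.mp hq with rfl | hq
          · exact absurd hb hc
          · exact Or.inr ⟨hq, hb⟩

-- master equivalence over the normalised rectangle
lemma pvMaster (x1 x2 y1 y2 : Int) (hx : x1 ≤ x2) (hy : y1 ≤ y2) (polygon : List (Int × Int)) :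
    pvCheckBorders polygon
      [(PySem.List.pyRange x1 (x2 + 1) 1).map (fun x => (x, y2)),
       (PySem.List.pyRange x1 (x2 + 1) 1).map (fun x => (x, y1)),
       (PySem.List.pyRange y1 (y2 + 1) 1).map (fun y => (x1, y)),
       (PySem.List.pyRange y1 (y2 + 1) 1).map (fun y => (x2, y))] =
    (PySem.Set.len (polygon.foldl (fun s p =>
        if x1 ≤ p.1 ∧ p.1 ≤ x2 ∧ y1 ≤ p.2 ∧ p.2 ≤ y2 ∧
            (p.1 = x1 ∨ p.1 = x2 ∨ p.2 = y1 ∨ p.2 = y2)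
        then PySem.Set.add s p else s) PySem.Set.empty) ==
      (if x1 = x2 ∧ y1 = y2 then (1 : Int)
       else if x1 = x2 then y2 - y1 + 1
       else if y1 = y2 then x2 - x1 + 1
       else 2 * (x2 - x1) + 2 * (y2 - y1))) := by
  obtain ⟨hnodup, hmem⟩ := pvMatched_mem x1 x2 y1 y2 polygon PySem.Set.empty (by simp [PySem.Set.empty])
  set matched := polygon.foldl (fun s p =>
      if x1 ≤ p.1 ∧ p.1 ≤ x2 ∧ y1 ≤ p.2 ∧ p.2 ≤ y2 ∧
          (p.1 = x1 ∨ p.1 = x2 ∨ p.2 = y1 ∨ p.2 = y2)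
      then PySem.Set.add s p else s) PySem.Set.empty with hmdef
  have hmem' : ∀ q, q ∈ matched ↔ q ∈ polygon ∧ pvOnB x1 x2 y1 y2 q := by
    intro q; rw [hmem q]; simp [PySem.Set.empty]
  have hA : pvCheckBorders polygon
      [(PySem.List.pyRange x1 (x2 + 1) 1).map (fun x => (x, y2)),
       (PySem.List.pyRange x1 (x2 + 1) 1).map (fun x => (x, y1)),
       (PySem.List.pyRange y1 (y2 + 1) 1).map (fun y => (x1, y)),
       (PySem.List.pyRange y1 (y2 + 1) 1).map (fun y => (x2, y))] = true ↔
      ∀ q, pvOnB x1 x2 y1 y2 q → q ∈ polygon := by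
    rw [pvCheckBorders_iff]
    simp only [List.mem_cons, List.not_mem_nil, or_false, pvCheckBorder_iff]
    constructor
    · intro h q hq
      rcases (pvMem_borders x1 x2 y1 y2 hx hy q).mpr hq with h' | h' | h' | h'
      · exact h _ (Or.inl rfl) q h'
      · exact h _ (Or.inr (Or.inl rfl)) q h'
      · exact h _ (Or.inr (Or.inr (Or.inl rfl))) q h'
      · exact h _ (Or.inr (Or.inr (Or.inr rfl))) q h'
    · intro h b hb q hq
      refine h q ((pvMem_borders x1 x2 y1 y2 hx hy q).mp ?_)
      rcases hb with rfl | rfl | rfl | rfl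
      · exact Or.inl hq
      · exact Or.inr (Or.inl hq)
      · exact Or.inr (Or.inr (Or.inl hq))
      · exact Or.inr (Or.inr (Or.inr hq))
  have hlen : PySem.Set.len matched = (matched.length : Int) := by
    simp [PySem.Set.len]
  by_cases hall : ∀ q, pvOnB x1 x2 y1 y2 q → q ∈ polygon
  · have h1 : pvCheckBorders polygon _ = true := hA.mpr hall
    rw [h1]
    have hperm : matched.Perm (pvE x1 x2 y1 y2) := by
      rw [List.perm_ext_iff_of_nodup hnodup (pvNodup_E x1 x2 y1 y2)]
      intro q
      rw [hmem' q, pvMem_E x1 x2 y1 y2 hx hy q]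
      exact ⟨fun ⟨_, hb⟩ => hb, fun hb => ⟨hall q hb, hb⟩⟩
    have := pvLen_E x1 x2 y1 y2 hx hy
    rw [hlen, hperm.length_eq, this]
    simp
  · push Not at hall
    obtain ⟨q, hqb, hqp⟩ := hall
    rcases Bool.eq_false_or_eq_true (pvCheckBorders polygon
      [(PySem.List.pyRange x1 (x2 + 1) 1).map (fun x => (x, y2)),
       (PySem.List.pyRange x1 (x2 + 1) 1).map (fun x => (x, y1)),
       (PySem.List.pyRange y1 (y2 + 1) 1).map (fun y => (x1, y)),
       (PySem.List.pyRange y1 (y2 + 1) 1).map (fun y => (x2, y))]) with h1 | h1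
    · exact absurd (hA.mp h1 q hqb) hqp
    · rw [h1]
      have hq_in_E : q ∈ pvE x1 x2 y1 y2 := (pvMem_E x1 x2 y1 y2 hx hy q).mpr hqb
      have hsub : matched ⊆ (pvE x1 x2 y1 y2).erase q := by
        intro p hp
        obtain ⟨hpp, hpb⟩ := (hmem' p).mp hp
        rw [(pvNodup_E x1 x2 y1 y2).mem_erase_iff]
        exact ⟨fun h => hqp (h ▸ hpp), (pvMem_E x1 x2 y1 y2 hx hy p).mpr hpb⟩
      have hle : matched.length ≤ ((pvE x1 x2 y1 y2).erase q).length :=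
        (hnodup.subperm hsub).length_le
      have herase : ((pvE x1 x2 y1 y2).erase q).length = (pvE x1 x2 y1 y2).length - 1 :=
        List.length_erase_of_mem hq_in_E
      have hEpos : 0 < (pvE x1 x2 y1 y2).length := List.length_pos_of_mem hq_in_E
      have hlenE := pvLen_E x1 x2 y1 y2 hx hy
      have hne : PySem.Set.len matched ≠
          (if x1 = x2 ∧ y1 = y2 then (1 : Int)
           else if x1 = x2 then y2 - y1 + 1
           else if y1 = y2 then x2 - x1 + 1
           else 2 * (x2 - x1) + 2 * (y2 - y1)) := by
        rw [hlen]
        omega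
      exact (beq_eq_false_iff_ne.mpr hne).symm

-- ===== VERDICT (by name: the statement is the Claim_ definition above) =====
theorem is_enclosed_spec : Claim_equal_is_enclosed := by
  intro corners polygon _
  unfold Spec_is_enclosed is_enclosed is_enclosed_alt
  obtain ⟨⟨ax, ay⟩, bx, by'⟩ := corners
  simp only [min_def, max_def]
  exact pvMaster _ _ _ _ (by split_ifs <;> omega) (by split_ifs <;> omega) polygon
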